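-- pv_equiv track=rewrite | github.com/And1F/CodeWars | 0130_numbers_need_friends_to.py | numbers_need_friends_too
-- ===== SOURCE A (Python) =====
-- def numbers_need_friends_too(n):
--     if n < 10: return n * 111
--     n = str(n)
--     ans = n[0]
--     if n[0] != n[1]: ans += 2*n[0]
--     for i in range(1,len(n)-1):
--         if n[i-1] != n[i] != n[i+1]: ans += 3*n[i]
--         else: ans += n[i]
--     if n[-1] != n[-2]: ans += 2*n[-1]
--     return int(ans + n[-1])
-- ===== SOURCE B (Python) =====
-- def numbers_need_friends_too(n):
--     if n < 10:
--         return n * 111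
--     s = str(n)
--     out = []
--     i = 0
--     while i < len(s):
--         j = i
--         while j < len(s) and s[j] == s[i]:
--             j += 1
--         run = s[i:j]
--         out.append(run if j - i > 1 else run * 3)
--         i = j
--     return int(''.join(out))
-- ===== Notes on version B (the rewrite author's own statement) =====
-- stated objective: alternative
-- what changed: Replaces A's per-position neighbor comparisons (separate head, middle-loop and tail cases) by a run-length scan: str(n) is split into maximal runs of equal digits, a run of length 1 is emitted three times and a longer run is emitted as-is.
import Mathlib
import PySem

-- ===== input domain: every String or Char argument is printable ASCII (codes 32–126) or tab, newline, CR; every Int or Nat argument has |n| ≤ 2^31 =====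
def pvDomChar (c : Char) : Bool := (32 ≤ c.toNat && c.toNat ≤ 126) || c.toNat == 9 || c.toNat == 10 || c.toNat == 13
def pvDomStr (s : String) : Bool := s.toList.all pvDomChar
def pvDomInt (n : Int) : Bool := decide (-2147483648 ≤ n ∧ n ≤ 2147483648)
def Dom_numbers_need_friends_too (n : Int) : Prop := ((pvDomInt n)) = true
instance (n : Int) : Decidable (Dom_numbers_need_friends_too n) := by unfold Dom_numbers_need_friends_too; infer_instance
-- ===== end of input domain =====

-- B replaces A's per-position neighbor comparisons (head / middle loop / tail)
-- by a run-length scan: runs of equal digits of length 1 are emitted three times,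
-- longer runs as-is; same O(d) cost, different algorithm ('alternative').


-- ===== PORT A =====
-- s[i] indexing uses pyGetD with default ' ': every index below is in range
-- (str(n) has ≥ 2 characters when n ≥ 10), so the default is never used and
-- the port is exact where Python would not raise.
def numbers_need_friends_too (n : Int) : Int :=
  if n < 10 then n * 111 else
    let s := PySem.Int.toChars n
    let g : Int → Char := fun i => PySem.List.pyGetD s i ' '
    let ans : List Char := [g 0]
    let ans := if g 0 ≠ g 1 then ans ++ [g 0, g 0] else ans
    let ans := (PySem.List.pyRange 1 (PySem.List.len s - 1)).foldl
        (fun acc i => if g (i-1) ≠ g i ∧ g i ≠ g (i+1) then acc ++ [g i, g i, g i] else acc ++ [g i]) ans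
    let ans := if g (-1) ≠ g (-2) then ans ++ [g (-1), g (-1)] else ans
    -- int(ans + n[-1]): the argument is a nonempty digit string, so int() succeeds; .getD 0 is never used
    (PySem.Int.ofChars? (ans ++ [g (-1)])).getD 0

-- ===== PORT B =====
-- the outer while loop of Source B: take the maximal run at the front (the inner
-- 'while s[j] == s[i]' loop = takeWhile), emit it once (run of >1 digit) or
-- three times (lonely digit), continue after the run
def pvRuns (s : List Char) : List Char :=
  match s with
  | [] => []
  | c :: rest =>
      let run := c :: rest.takeWhile (fun d => d == c)
      (if run.length > 1 then run else run ++ run ++ run) ++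
        pvRuns (rest.dropWhile (fun d => d == c))
termination_by s.length
decreasing_by
  simpa using Nat.lt_succ_of_le (List.length_dropWhile_le _ _)

def numbers_need_friends_too_alt (n : Int) : Int :=
  if n < 10 then n * 111 else
    -- int(''.join(out)): nonempty digit string, int() succeeds; .getD 0 never used
    (PySem.Int.ofChars? (pvRuns (PySem.Int.toChars n))).getD 0

-- ===== PRECONDITION & SPEC =====
def Spec_numbers_need_friends_too (n : Int) (out : Int) : Prop := out = numbers_need_friends_too_alt n
instance (n : Int) (out : Int) : Decidable (Spec_numbers_need_friends_too n out) := by unfold Spec_numbers_need_friends_too; infer_instance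

-- ===== CLAIM (what is proved, stated in full; the proofs are below) =====
def Claim_equal_numbers_need_friends_too : Prop := ∀ (n : Int), Dom_numbers_need_friends_too n → Spec_numbers_need_friends_too n (numbers_need_friends_too n)

-- ===== LEMMAS AND PROOFS =====

-- str(n) has at least two characters when 10 ≤ n
lemma pvLen (n : Int) (h : 10 ≤ n) : 2 ≤ (PySem.Int.toChars n).length := by
  unfold PySem.Int.toChars
  rw [if_neg (by omega : ¬ n < 0)]
  have h10 : 10 ≤ n.toNat := by omega
  rw [Nat.toDigits_of_base_le (by norm_num) h10]
  have := @Nat.length_toDigits_pos 10 (n.toNat / 10)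
  simp
  omega

-- per-position chunk of A's pass (proof helper): the digit once if it equals an
-- existing neighbor, three times otherwise
def pvChunk (s : List Char) (i : Int) (c : Char) : List Char :=
  let neighbors : List Char :=
    (if 0 < i then [PySem.List.pyGetD s (i-1) ' '] else []) ++
    (if i < PySem.List.len s - 1 then [PySem.List.pyGetD s (i+1) ' '] else []) ;
  if c ∈ neighbors then [c] else [c, c, c]

-- the same chunk in terms of optional previous/next characters
def pvTriple (p : Option Char) (c : Char) (nx : Option Char) : List Char :=
  if p = some c ∨ nx = some c then [c] else [c, c, c]

-- contextual left-to-right scan carrying the previous character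
def pvAux (p : Option Char) (s : List Char) : List Char :=
  match s with
  | [] => []
  | c :: rest => pvTriple p c rest.head? ++ pvAux (some c) rest

def pvPrevOf (s : List Char) (k : Nat) : Option Char :=
  if k = 0 then none else s[k-1]?

lemma pv_g_neg1 (s : List Char) (h : 2 ≤ s.length) :
    PySem.List.pyGetD s (-1) ' ' = PySem.List.pyGetD s ((s.length : Int) - 1) ' ' := by
  have hc : ((s.length : Int) - 1) = ((s.length - 1 : Nat) : Int) := by omega
  rw [hc, PySem.List.pyGetD_natCast]
  simp [PySem.List.pyGetD, PySem.List.pyGet?_neg_one, List.getLast?_eq_getElem?,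
    List.getD_eq_getElem?_getD]

lemma pv_g_neg2 (s : List Char) (h : 2 ≤ s.length) :
    PySem.List.pyGetD s (-2) ' ' = PySem.List.pyGetD s ((s.length : Int) - 2) ' ' := by
  have hc : ((s.length : Int) - 2) = ((s.length - 2 : Nat) : Int) := by omega
  rw [hc, PySem.List.pyGetD_natCast]
  simp [PySem.List.pyGetD, PySem.List.pyGet?_neg_ofNat s 2 (by omega) (by omega),
    List.getD_eq_getElem?_getD]

lemma pvChunk_head (s : List Char) (h : 2 ≤ s.length) :
    pvChunk s 0 (PySem.List.pyGetD s 0 ' ') =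
      if PySem.List.pyGetD s 0 ' ' ≠ PySem.List.pyGetD s 1 ' '
      then [PySem.List.pyGetD s 0 ' ', PySem.List.pyGetD s 0 ' ', PySem.List.pyGetD s 0 ' ']
      else [PySem.List.pyGetD s 0 ' '] := by
  by_cases h01 : PySem.List.pyGetD s 0 ' ' = PySem.List.pyGetD s 1 ' '
  · simp [pvChunk, PySem.List.len_eq, h01]; omega
  · simp [pvChunk, PySem.List.len_eq, h01]

lemma pvChunk_last (s : List Char) (h : 2 ≤ s.length) :
    pvChunk s ((s.length : Int) - 1) (PySem.List.pyGetD s ((s.length : Int) - 1) ' ') =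
      if PySem.List.pyGetD s ((s.length : Int) - 1) ' ' ≠ PySem.List.pyGetD s ((s.length : Int) - 2) ' '
      then [PySem.List.pyGetD s ((s.length : Int) - 1) ' ', PySem.List.pyGetD s ((s.length : Int) - 1) ' ', PySem.List.pyGetD s ((s.length : Int) - 1) ' ']
      else [PySem.List.pyGetD s ((s.length : Int) - 1) ' '] := by
  simp only [pvChunk, PySem.List.len_eq,
    if_pos (show (0:Int) < (s.length : Int) - 1 by omega),
    if_neg (show ¬ (s.length : Int) - 1 < (s.length : Int) - 1 by omega),
    show (s.length : Int) - 1 - 1 = (s.length : Int) - 2 from by ring]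
  by_cases hL : PySem.List.pyGetD s ((s.length : Int) - 1) ' ' = PySem.List.pyGetD s ((s.length : Int) - 2) ' ' <;>
    simp [hL]

lemma pvChunk_mid (s : List Char) (j : Int) (h1 : 1 ≤ j) (h2 : j < (s.length : Int) - 1) :
    pvChunk s j (PySem.List.pyGetD s j ' ') =
      if PySem.List.pyGetD s (j-1) ' ' ≠ PySem.List.pyGetD s j ' ' ∧ PySem.List.pyGetD s j ' ' ≠ PySem.List.pyGetD s (j+1) ' '
      then [PySem.List.pyGetD s j ' ', PySem.List.pyGetD s j ' ', PySem.List.pyGetD s j ' ']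
      else [PySem.List.pyGetD s j ' '] := by
  simp only [pvChunk, PySem.List.len_eq, if_pos (show (0:Int) < j by omega),
    if_pos h2]
  by_cases hA : PySem.List.pyGetD s (j-1) ' ' = PySem.List.pyGetD s j ' '
  · by_cases hB : PySem.List.pyGetD s j ' ' = PySem.List.pyGetD s (j+1) ' '
    · simp [hA, hB]
    · simp [hA, hB]
  · by_cases hB : PySem.List.pyGetD s j ' ' = PySem.List.pyGetD s (j+1) ' '
    · simp [hB]
    · simp [hA, hB, Ne.symm hA]

-- A's string equals the flattened list of per-position chunks
lemma pvListEqA (s : List Char) (h2 : 2 ≤ s.length) :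
    (let g : Int → Char := fun i => PySem.List.pyGetD s i ' '
     let ans : List Char := [g 0]
     let ans := if g 0 ≠ g 1 then ans ++ [g 0, g 0] else ans
     let ans := (PySem.List.pyRange 1 ((s.length : Int) - 1)).foldl
        (fun acc i => if g (i-1) ≠ g i ∧ g i ≠ g (i+1) then acc ++ [g i, g i, g i] else acc ++ [g i]) ans
     let ans := if g (-1) ≠ g (-2) then ans ++ [g (-1), g (-1)] else ans
     ans ++ [g (-1)])
    = ((PySem.List.pyRange 0 (s.length : Int)).map
        (fun i => pvChunk s i (PySem.List.pyGetD s i ' '))).flatten := by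
  dsimp only
  have hsplit : PySem.List.pyRange 0 (s.length : Int) =
      0 :: (PySem.List.pyRange 1 ((s.length : Int) - 1) ++ [(s.length : Int) - 1]) := by
    rw [PySem.List.pyRange_one_cons (show (0:Int) < (s.length : Int) by omega)]
    norm_num
    have hsr := PySem.List.pyRange_one_succ_right
      (show (1:Int) ≤ (s.length : Int) - 1 by omega)
    rw [show ((s.length : Int) - 1) + 1 = (s.length : Int) from by ring] at hsr
    rw [hsr]
  rw [hsplit]
  simp only [List.map_cons, List.map_append, List.flatten_cons, List.flatten_append]
  -- rewrite the A-side fold into a flatMap of per-index chunks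
  have hf : (fun (acc : List Char) (i : Int) =>
        if PySem.List.pyGetD s (i-1) ' ' ≠ PySem.List.pyGetD s i ' ' ∧ PySem.List.pyGetD s i ' ' ≠ PySem.List.pyGetD s (i+1) ' '
        then acc ++ [PySem.List.pyGetD s i ' ', PySem.List.pyGetD s i ' ', PySem.List.pyGetD s i ' ']
        else acc ++ [PySem.List.pyGetD s i ' ']) =
      fun acc i => acc ++ (if PySem.List.pyGetD s (i-1) ' ' ≠ PySem.List.pyGetD s i ' ' ∧ PySem.List.pyGetD s i ' ' ≠ PySem.List.pyGetD s (i+1) ' '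
        then [PySem.List.pyGetD s i ' ', PySem.List.pyGetD s i ' ', PySem.List.pyGetD s i ' ']
        else [PySem.List.pyGetD s i ' ']) := by
    funext acc i; split <;> rfl
  rw [hf, PySem.List.foldl_append_eq_flatMap]
  rw [List.flatMap_def]
  -- middle chunks agree pointwise
  have hmid : (PySem.List.pyRange 1 ((s.length : Int) - 1)).map
      (fun i => if PySem.List.pyGetD s (i-1) ' ' ≠ PySem.List.pyGetD s i ' ' ∧ PySem.List.pyGetD s i ' ' ≠ PySem.List.pyGetD s (i+1) ' '
        then [PySem.List.pyGetD s i ' ', PySem.List.pyGetD s i ' ', PySem.List.pyGetD s i ' ']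
        else [PySem.List.pyGetD s i ' ']) =
      (PySem.List.pyRange 1 ((s.length : Int) - 1)).map
      (fun j => pvChunk s j (PySem.List.pyGetD s j ' ')) := by
    apply List.map_congr_left
    intro j hj
    rw [PySem.List.mem_pyRange_one] at hj
    exact (pvChunk_mid s j hj.1 hj.2).symm
  have hhead : (if PySem.List.pyGetD s 0 ' ' ≠ PySem.List.pyGetD s 1 ' '
      then [PySem.List.pyGetD s 0 ' '] ++ [PySem.List.pyGetD s 0 ' ', PySem.List.pyGetD s 0 ' ']
      else [PySem.List.pyGetD s 0 ' ']) = pvChunk s 0 (PySem.List.pyGetD s 0 ' ') := by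
    rw [pvChunk_head s h2]; split <;> rfl
  have htail : ∀ (X : List Char),
      (if PySem.List.pyGetD s (-1) ' ' ≠ PySem.List.pyGetD s (-2) ' '
        then X ++ [PySem.List.pyGetD s (-1) ' ', PySem.List.pyGetD s (-1) ' '] else X) ++ [PySem.List.pyGetD s (-1) ' ']
      = X ++ pvChunk s ((s.length : Int) - 1) (PySem.List.pyGetD s ((s.length : Int) - 1) ' ') := by
    intro X
    rw [pvChunk_last s h2, pv_g_neg1 s h2, pv_g_neg2 s h2]
    split <;> simp
  rw [htail, hhead, hmid]
  simp [List.append_assoc]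

-- a chunk in option form
lemma pvChunk_triple (s : List Char) (k : Nat) (hk : k < s.length) :
    pvChunk s (k : Int) (PySem.List.pyGetD s (k : Int) ' ') =
      pvTriple (pvPrevOf s k) s[k] s[k+1]? := by
  have hc : PySem.List.pyGetD s (k : Int) ' ' = s[k] := by
    rw [PySem.List.pyGetD_natCast]; simp [List.getD_eq_getElem?_getD, List.getElem?_eq_getElem hk]
  by_cases hk0 : k = 0
  · subst hk0
    by_cases hk1 : 1 < s.length
    · have hn : ((0:Nat) + 1 : Nat) < s.length := by omega
      simp only [pvChunk, pvTriple, pvPrevOf, PySem.List.len_eq, hc]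
      rw [show ((0:Nat):Int) + 1 = ((1:Nat):Int) from by norm_num, PySem.List.pyGetD_natCast]
      simp [List.getD_eq_getElem?_getD, List.getElem?_eq_getElem hn]
      by_cases h : s[1] = s[0]
      · simp [h, hk1]
      · simp [h, hk1]; exact fun he => h he.symm
    · have hl : s.length = 1 := by omega
      simp only [pvChunk, pvTriple, pvPrevOf, PySem.List.len_eq, hc, hl]
      simp [hl]
  · have hk1 : 1 ≤ k := by omega
    have hprev : pvPrevOf s k = some s[k-1] := by
      simp [pvPrevOf, hk0, List.getElem?_eq_getElem (show k - 1 < s.length by omega)]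
    have hpm : ((k:Int) - 1) = ((k-1 : Nat) : Int) := by omega
    have hgprev : PySem.List.pyGetD s ((k:Int)-1) ' ' = s[k-1] := by
      rw [hpm, PySem.List.pyGetD_natCast]
      simp [List.getD_eq_getElem?_getD, List.getElem?_eq_getElem (show k - 1 < s.length by omega)]
    by_cases hkl : k + 1 < s.length
    · have hgnext : PySem.List.pyGetD s ((k:Int)+1) ' ' = s[k+1] := by
        rw [show ((k:Int) + 1) = ((k+1 : Nat) : Int) from by omega, PySem.List.pyGetD_natCast]
        simp [List.getD_eq_getElem?_getD, List.getElem?_eq_getElem hkl]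
      simp only [pvChunk, pvTriple, PySem.List.len_eq, hc, hgprev, hgnext, hprev,
        if_pos (show (0:Int) < (k:Int) by omega),
        if_pos (show (k:Int) < (s.length:Int) - 1 by omega),
        List.getElem?_eq_getElem hkl]
      by_cases hA : s[k-1] = s[k] <;> by_cases hB : s[k+1] = s[k] <;>
        simp [hA, hB]
      exact ⟨fun he => hA he.symm, fun he => hB he.symm⟩
    · simp only [pvChunk, pvTriple, PySem.List.len_eq, hc, hgprev, hprev,
        if_pos (show (0:Int) < (k:Int) by omega),
        if_neg (show ¬ (k:Int) < (s.length:Int) - 1 by omega),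
        List.getElem?_eq_none (show s.length ≤ k + 1 by omega)]
      by_cases hA : s[k-1] = s[k] <;> simp [hA]
      exact fun he => hA he.symm

-- the chunk list is the contextual scan
lemma pvMapChunk_aux (s : List Char) : ∀ (m k : Nat), s.length - k = m → k ≤ s.length →
    ((PySem.List.pyRange (k : Int) (s.length : Int)).map
        (fun i => pvChunk s i (PySem.List.pyGetD s i ' '))).flatten
      = pvAux (pvPrevOf s k) (s.drop k) := by
  intro m
  induction m with
  | zero =>
    intro k hm hk
    have : k = s.length := by omega
    subst this
    rw [PySem.List.pyRange_one_eq_nil (le_refl _)]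
    simp [pvAux]
  | succ m ih =>
    intro k hm hk
    have hlt : k < s.length := by omega
    rw [PySem.List.pyRange_one_cons (show (k:Int) < (s.length:Int) by omega)]
    rw [show ((k:Int) + 1) = ((k+1 : Nat) : Int) from by omega]
    simp only [List.map_cons, List.flatten_cons]
    rw [ih (k+1) (by omega) (by omega)]
    rw [pvChunk_triple s k hlt]
    have hdrop : s.drop k = s[k] :: s.drop (k+1) := (List.getElem_cons_drop hlt).symm
    rw [hdrop]
    simp only [pvAux, List.head?_drop]
    congr 1
    simp [pvPrevOf, List.getElem?_eq_getElem hlt]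

lemma pvAux_none_of_ne (p c : Char) (rest : List Char) (h : p ≠ c) :
    pvAux (some p) (c :: rest) = pvAux none (c :: rest) := by
  simp only [pvAux, pvTriple]
  congr 2
  simp [h]

lemma pvAux_run (c : Char) : ∀ (t : List Char),
    pvAux (some c) t = t.takeWhile (fun d => d == c) ++ pvAux none (t.dropWhile (fun d => d == c)) := by
  intro t
  induction t with
  | nil => simp [pvAux]
  | cons d t' ih =>
    by_cases hd : d = c
    · subst hd
      simp only [List.takeWhile_cons, List.dropWhile_cons, beq_self_eq_true]
      simp only [pvAux]
      rw [ih]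
      have : pvTriple (some d) d t'.head? = [d] := by simp [pvTriple]
      rw [this]
      simp
    · rw [pvAux_none_of_ne c d t' (Ne.symm hd)]
      simp [hd]

lemma pvRuns_eq_aux (s : List Char) : pvRuns s = pvAux none s := by
  induction s using pvRuns.induct with
  | case1 => rw [pvRuns]; rfl
  | case2 c rest ih =>
    rw [pvRuns]
    rw [ih]
    have key : (if (c :: rest.takeWhile (fun d => d == c)).length > 1
        then c :: rest.takeWhile (fun d => d == c)
        else (c :: rest.takeWhile (fun d => d == c)) ++ (c :: rest.takeWhile (fun d => d == c)) ++ (c :: rest.takeWhile (fun d => d == c)))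
        = pvTriple none c rest.head? ++ rest.takeWhile (fun d => d == c) := by
      cases rest with
      | nil => simp [pvTriple]
      | cons d t' =>
        by_cases hd : d = c
        · subst hd
          simp [pvTriple]
        · simp [hd, pvTriple]
    rw [key]
    conv_rhs => rw [pvAux]
    rw [pvAux_run]
    simp [List.append_assoc]

lemma pvEq (n : Int) : numbers_need_friends_too n = numbers_need_friends_too_alt n := by
  by_cases hn : n < 10
  · simp [numbers_need_friends_too, numbers_need_friends_too_alt, hn]
  · have h2 : 2 ≤ (PySem.Int.toChars n).length := pvLen n (by omega)
    simp only [numbers_need_friends_too, numbers_need_friends_too_alt, if_neg hn,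
      PySem.List.len_eq]
    apply congrArg (fun l => (PySem.Int.ofChars? l).getD 0)
    have h1 := pvListEqA (PySem.Int.toChars n) h2
    have h3 := pvMapChunk_aux (PySem.Int.toChars n) (PySem.Int.toChars n).length 0 (by omega) (by omega)
    simp only [Nat.cast_zero] at h3
    rw [pvRuns_eq_aux]
    rw [h1, h3]
    simp [pvPrevOf]

-- ===== VERDICT (by name: the statement is the Claim_ definition above) =====
theorem numbers_need_friends_too_spec : Claim_equal_numbers_need_friends_too := by
  intro n _
  unfold Spec_numbers_need_friends_too
  exact pvEq n
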